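-- pv_equiv track=rewrite | github.com/jy1529098645-gif/MATS | multi_agent_system.py | domain_fit_distribution
-- ===== SOURCE A (Python) =====
-- from typing import List
--
-- def domain_fit_distribution(papers: List[dict]) -> dict:
--     counts = {
--         "direct": 0,
--         "mostly direct": 0,
--         "adjacent": 0,
--         "off-target": 0,
--     }
--     for p in papers:
--         label = str(p.get("domain_fit_label", "adjacent")).strip().lower()
--         if label in counts:
--             counts[label] += 1
--         else:
--             counts["adjacent"] += 1
--     return counts
-- ===== SOURCE B (Python) =====
-- def domain_fit_distribution(papers):
--     def norm(p):
--         return str(p.get("domain_fit_label", "adjacent")).strip().lower()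
--     direct = sum(1 for p in papers if norm(p) == "direct")
--     mostly_direct = sum(1 for p in papers if norm(p) == "mostly direct")
--     off_target = sum(1 for p in papers if norm(p) == "off-target")
--     return {
--         "direct": direct,
--         "mostly direct": mostly_direct,
--         "adjacent": len(papers) - direct - mostly_direct - off_target,
--         "off-target": off_target,
--     }
-- ===== Notes on version B (the rewrite author's own statement) =====
-- stated objective: alternative
-- what changed: Replaces the single increment loop over a running 4-key counter dict with three independent filtered counting passes for the explicitly-named labels and computes the catch-all 'adjacent' bucket by complement (len(papers) minus the other three).
import Mathlib
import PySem

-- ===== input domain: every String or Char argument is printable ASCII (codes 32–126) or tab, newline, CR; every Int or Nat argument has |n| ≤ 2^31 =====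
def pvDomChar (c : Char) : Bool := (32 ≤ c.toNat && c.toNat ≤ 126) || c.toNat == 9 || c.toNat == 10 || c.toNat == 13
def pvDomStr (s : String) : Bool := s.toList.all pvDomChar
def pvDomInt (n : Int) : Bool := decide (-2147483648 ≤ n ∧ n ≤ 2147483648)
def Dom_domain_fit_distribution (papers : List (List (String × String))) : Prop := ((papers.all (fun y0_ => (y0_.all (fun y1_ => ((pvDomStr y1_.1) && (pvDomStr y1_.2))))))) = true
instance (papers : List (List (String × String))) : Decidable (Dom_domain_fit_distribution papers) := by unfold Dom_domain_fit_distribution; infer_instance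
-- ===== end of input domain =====

-- B replaces A's single increment loop over a 4-key counter dict by three independent
-- filtered counting passes plus a complement for the catch-all 'adjacent' bucket (alternative decomposition, same cost).


-- shared normalization used by both Pythons: str(p.get("domain_fit_label", "adjacent")).strip().lower()
def pvNorm (p : List (String × String)) : String :=
  PySem.Str.lower (PySem.Str.strip (PySem.Dict.getD (PySem.Dict.mk p) "domain_fit_label" "adjacent"))

-- ===== PORT A =====
-- the body of A's for-loop
def stepA (counts : PySem.Dict String Int) (p : List (String × String)) : PySem.Dict String Int :=
  let label := pvNorm p
  if counts.contains label then counts.modify label 0 (· + 1)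
  else counts.modify "adjacent" 0 (· + 1)

def domain_fit_distribution (papers : List (List (String × String))) : List (String × Int) :=
  let counts : PySem.Dict String Int :=
    ((((PySem.Dict.empty).insert "direct" 0).insert "mostly direct" 0).insert "adjacent" 0).insert "off-target" 0
  (papers.foldl stepA counts).items

-- ===== PORT B =====
def domain_fit_distribution_alt (papers : List (List (String × String))) : List (String × Int) :=
  let direct : Int := papers.countP (fun p => pvNorm p == "direct")
  let mostly_direct : Int := papers.countP (fun p => pvNorm p == "mostly direct")
  let off_target : Int := papers.countP (fun p => pvNorm p == "off-target")
  [("direct", direct), ("mostly direct", mostly_direct),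
   ("adjacent", (papers.length : Int) - direct - mostly_direct - off_target),
   ("off-target", off_target)]

-- ===== PRECONDITION & SPEC =====
def Spec_domain_fit_distribution (papers : List (List (String × String))) (out : List (String × Int)) : Prop := out = domain_fit_distribution_alt papers
instance (papers : List (List (String × String))) (out : List (String × Int)) : Decidable (Spec_domain_fit_distribution papers out) := by unfold Spec_domain_fit_distribution; infer_instance

-- ===== CLAIM (what is proved, stated in full; the proofs are below) =====
def Claim_equal_domain_fit_distribution : Prop := ∀ (papers : List (List (String × String))), Dom_domain_fit_distribution papers → Spec_domain_fit_distribution papers (domain_fit_distribution papers)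

-- ===== LEMMAS AND PROOFS =====

-- the 4-key state of A's loop, counters symbolic
def mk4 (a b c d : Int) : PySem.Dict String Int :=
  PySem.Dict.mk [("direct", a), ("mostly direct", b), ("adjacent", c), ("off-target", d)]

lemma stepA_eval (a b c d : Int) (p : List (String × String)) :
    stepA (mk4 a b c d) p =
      if pvNorm p = "direct" then mk4 (a+1) b c d
      else if pvNorm p = "mostly direct" then mk4 a (b+1) c d
      else if pvNorm p = "off-target" then mk4 a b c (d+1)
      else mk4 a b (c+1) d := by
  by_cases h1 : pvNorm p = "direct"
  · simp [stepA, mk4, h1, PySem.Dict.contains, PySem.Dict.modify, PySem.Dict.insert,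
      PySem.Dict.getD, PySem.Dict.get?]
  · by_cases h2 : pvNorm p = "mostly direct"
    · simp [stepA, mk4, h2, PySem.Dict.contains, PySem.Dict.modify, PySem.Dict.insert,
        PySem.Dict.getD, PySem.Dict.get?]
    · by_cases h3 : pvNorm p = "off-target"
      · simp [stepA, mk4, h3, PySem.Dict.contains, PySem.Dict.modify, PySem.Dict.insert,
          PySem.Dict.getD, PySem.Dict.get?]
      · by_cases h4 : pvNorm p = "adjacent"
        · simp [stepA, mk4, h4, PySem.Dict.contains, PySem.Dict.modify, PySem.Dict.insert,
            PySem.Dict.getD, PySem.Dict.get?]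
        · simp [stepA, mk4, h1, h2, h3, h4, PySem.Dict.contains, PySem.Dict.modify,
            PySem.Dict.insert, PySem.Dict.getD, PySem.Dict.get?]
          intro h
          rcases h with h | h | h | h
          exacts [absurd h.symm h1, absurd h.symm h2, absurd h.symm h4, absurd h.symm h3]

lemma dfd_loop (ps : List (List (String × String))) (a b c d : Int) :
    (ps.foldl stepA (mk4 a b c d)).items
    = [("direct", a + (ps.countP (fun p => pvNorm p == "direct") : Int)),
       ("mostly direct", b + (ps.countP (fun p => pvNorm p == "mostly direct") : Int)),
       ("adjacent", c + ((ps.length : Int)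
          - (ps.countP (fun p => pvNorm p == "direct") : Int)
          - (ps.countP (fun p => pvNorm p == "mostly direct") : Int)
          - (ps.countP (fun p => pvNorm p == "off-target") : Int))),
       ("off-target", d + (ps.countP (fun p => pvNorm p == "off-target") : Int))] := by
  induction ps generalizing a b c d with
  | nil => simp [mk4, PySem.Dict.items]
  | cons p ps ih =>
    rw [List.foldl_cons, stepA_eval]
    by_cases h1 : pvNorm p = "direct"
    · simp [h1, ih, List.countP_cons]
      omega
    · by_cases h2 : pvNorm p = "mostly direct"
      · simp [h1, h2, ih, List.countP_cons]
        omega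
      · by_cases h3 : pvNorm p = "off-target"
        · simp [h1, h2, h3, ih, List.countP_cons]
          omega
        · simp [h1, h2, h3, ih, List.countP_cons]
          omega

-- ===== VERDICT (by name: the statement is the Claim_ definition above) =====
theorem domain_fit_distribution_spec : Claim_equal_domain_fit_distribution := by
  intro papers _
  show domain_fit_distribution papers = domain_fit_distribution_alt papers
  unfold domain_fit_distribution domain_fit_distribution_alt
  have h := dfd_loop papers 0 0 0 0
  simp only [zero_add] at h
  exact h
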